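-- pv_equiv track=rewrite | github.com/ckoons/BubbleSpacetimeTheory | play/toy_310_arthur_packet_filter.py | gl_decomposition
-- ===== SOURCE A (Python) =====
-- def gl_decomposition(p):
--     """Express partition as GL building blocks."""
--     from collections import Counter
--     c = Counter(p)
--     parts = []
--     for size in sorted(c.keys(), reverse=True):
--         count = c[size]
--         if count == 1:
--             parts.append(f"GL({size})")
--         else:
--             parts.append(f"GL({size})^{count}")
--     return " × ".join(parts)
-- ===== SOURCE B (Python) =====
-- def gl_decomposition(p):
--     """Express partition as GL building blocks."""
--     s = sorted(p, reverse=True)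
--     pieces = []
--     i, n = 0, len(s)
--     while i < n:
--         j = i + 1
--         while j < n and s[j] == s[i]:
--             j += 1
--         cnt = j - i
--         pieces.append(f"GL({s[i]})" if cnt == 1 else f"GL({s[i]})^{cnt}")
--         i = j
--     return " × ".join(pieces)
-- ===== Notes on version B (the rewrite author's own statement) =====
-- stated objective: alternative
-- what changed: Replaces the Counter frequency dict plus a sort of its keys by a single reverse sort of the list itself followed by a run-length scan of consecutive equal parts; no dictionary is built.
import Mathlib
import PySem

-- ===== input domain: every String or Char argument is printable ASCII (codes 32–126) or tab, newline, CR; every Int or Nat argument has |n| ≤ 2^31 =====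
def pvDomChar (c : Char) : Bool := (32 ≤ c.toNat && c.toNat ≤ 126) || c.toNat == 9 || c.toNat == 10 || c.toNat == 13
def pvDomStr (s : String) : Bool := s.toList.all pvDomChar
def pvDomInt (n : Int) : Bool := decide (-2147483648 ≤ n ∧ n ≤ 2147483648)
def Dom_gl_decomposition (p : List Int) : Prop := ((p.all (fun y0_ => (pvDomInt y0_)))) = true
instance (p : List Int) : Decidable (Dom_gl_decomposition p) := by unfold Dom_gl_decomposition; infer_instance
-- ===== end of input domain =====

-- B replaces A's Counter dict + key sort by one reverse sort of the list and a run-length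
-- scan of consecutive equal parts (alternative decomposition, same asymptotic cost).

-- ===== PORT A =====
def gl_decomposition (p : List Int) : String :=
  let c := PySem.Dict.counter p
  let parts : List String :=
    (PySem.List.sorted c.keys (fun x => x) true).foldl
      (fun parts size =>
        let count := c.getD size 0
        if count == 1 then parts ++ ["GL(" ++ PySem.Int.toStr size ++ ")"]
        else parts ++ ["GL(" ++ PySem.Int.toStr size ++ ")^" ++ PySem.Int.toStr count]) []
  PySem.Str.join " × " parts

-- ===== PORT B =====
-- the outer while loop of Source B over the suffix s[i:]; the inner while computes the run length
def glRuns : List Int → List String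
  | [] => []
  | x :: rest =>
    let run : Int := 1 + (rest.takeWhile (fun y => y == x)).length
    (if run == 1 then "GL(" ++ PySem.Int.toStr x ++ ")"
     else "GL(" ++ PySem.Int.toStr x ++ ")^" ++ PySem.Int.toStr run)
      :: glRuns (rest.dropWhile (fun y => y == x))
  termination_by s => s.length
  decreasing_by
    have := (List.dropWhile_sublist (l := rest) (fun y => y == x)).length_le
    simp; omega

def gl_decomposition_alt (p : List Int) : String :=
  PySem.Str.join " × " (glRuns (PySem.List.sorted p (fun x => x) true))

-- ===== PRECONDITION & SPEC =====
def Spec_gl_decomposition (p : List Int) (out : String) : Prop := out = gl_decomposition_alt p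
instance (p : List Int) (out : String) : Decidable (Spec_gl_decomposition p out) := by unfold Spec_gl_decomposition; infer_instance

-- ===== CLAIM (what is proved, stated in full; the proofs are below) =====
def Claim_equal_gl_decomposition : Prop := ∀ (p : List Int), Dom_gl_decomposition p → Spec_gl_decomposition p (gl_decomposition p)

-- ===== LEMMAS AND PROOFS =====

-- the string both programs emit for a part of size v occurring c times
def pieceFor (v c : Int) : String :=
  if c == 1 then "GL(" ++ PySem.Int.toStr v ++ ")"
  else "GL(" ++ PySem.Int.toStr v ++ ")^" ++ PySem.Int.toStr c

-- the distinct part sizes in the order B's run scan visits them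
def runKeys : List Int → List Int
  | [] => []
  | x :: rest => x :: runKeys (rest.dropWhile (fun y => y == x))
  termination_by s => s.length
  decreasing_by
    have := (List.dropWhile_sublist (l := rest) (fun y => y == x)).length_le
    simp; omega

lemma dropWhile_lt (x : Int) (rest : List Int) (hle : ∀ y ∈ rest, y ≤ x)
    (hrest : rest.Pairwise (fun a b => b ≤ a)) :
    ∀ y ∈ rest.dropWhile (fun y => y == x), y < x := by
  induction rest with
  | nil => simp
  | cons a t ih =>
    rw [List.dropWhile_cons]
    by_cases h : (a == x) = true
    · simp only [h, if_true]
      exact ih (fun y hy => hle y (List.mem_cons_of_mem _ hy)) (List.pairwise_cons.mp hrest).2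
    · rw [if_neg h]
      have hax : a < x := lt_of_le_of_ne (hle a List.mem_cons_self) (by simpa using h)
      intro y hy
      rcases List.mem_cons.mp hy with h' | h'
      · omega
      · have : y ≤ a := (List.pairwise_cons.mp hrest).1 y h'
        omega

lemma runs_props : ∀ (n : Nat) (s : List Int), s.length ≤ n →
    s.Pairwise (fun a b => b ≤ a) →
    (∀ v, v ∈ runKeys s ↔ v ∈ s) ∧ (runKeys s).Nodup ∧
    (runKeys s).Pairwise (fun a b => b < a) ∧
    glRuns s = (runKeys s).map (fun v => pieceFor v ((s.count v : Int))) := by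
  intro n
  induction n with
  | zero =>
    intro s hs _
    have : s = [] := List.length_eq_zero_iff.mp (Nat.le_zero.mp hs)
    subst this
    simp [runKeys, glRuns]
  | succ n ih =>
    intro s hs hp
    match s with
    | [] => simp [runKeys, glRuns]
    | x :: rest =>
      have hrest : rest.Pairwise (fun a b => b ≤ a) := (List.pairwise_cons.mp hp).2
      have hle : ∀ y ∈ rest, y ≤ x := (List.pairwise_cons.mp hp).1
      have hsplit : rest.takeWhile (fun y => y == x) ++ rest.dropWhile (fun y => y == x) = rest :=
        List.takeWhile_append_dropWhile
      -- every element of the run equals x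
      have hrunx : ∀ y ∈ rest.takeWhile (fun y => y == x), y = x := by
        intro y hy
        have := List.mem_takeWhile_imp hy
        simpa using this
      -- every element after the run is < x
      have hs'lt : ∀ y ∈ rest.dropWhile (fun y => y == x), y < x :=
        dropWhile_lt x rest hle hrest
      have hs'len : (rest.dropWhile (fun y => y == x)).length ≤ n := by
        have h1 := (List.dropWhile_sublist (l := rest) (fun y => y == x)).length_le
        simp at hs; omega
      obtain ⟨hmem, hnd, hpw, heq⟩ := ih (rest.dropWhile (fun y => y == x)) hs'len
        (hrest.sublist (List.dropWhile_sublist _))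
      have hxnot : x ∉ rest.dropWhile (fun y => y == x) := fun h => absurd (hs'lt x h) (lt_irrefl x)
      have hkeys : runKeys (x :: rest) = x :: runKeys (rest.dropWhile (fun y => y == x)) := by rw [runKeys]
      refine ⟨?_, ?_, ?_, ?_⟩
      · intro v
        rw [hkeys]
        constructor
        · intro h
          rcases List.mem_cons.mp h with h | h
          · simp [h]
          · have : v ∈ rest.dropWhile (fun y => y == x) := (hmem v).mp h
            have : v ∈ rest := by rw [← hsplit]; exact List.mem_append_right _ this
            simp [this]
        · intro h
          rcases List.mem_cons.mp h with h | h
          · simp [h]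
          · rw [← hsplit] at h
            rcases List.mem_append.mp h with h | h
            · simp [hrunx v h]
            · exact List.mem_cons_of_mem _ ((hmem v).mpr h)
      · rw [hkeys]
        exact List.nodup_cons.mpr ⟨fun h => hxnot ((hmem x).mp h), hnd⟩
      · rw [hkeys]
        exact List.pairwise_cons.mpr ⟨fun y hy => hs'lt y ((hmem y).mp hy), hpw⟩
      · -- run-length counts
        have hrc : ∀ v : Int, rest.count v =
            (rest.takeWhile (fun y => y == x)).count v + (rest.dropWhile (fun y => y == x)).count v := by
          intro v
          conv_lhs => rw [← hsplit]
          rw [List.count_append]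
        have hcx : (x :: rest).count x = 1 + (rest.takeWhile (fun y => y == x)).length := by
          have h0 : (rest.dropWhile (fun y => y == x)).count x = 0 := List.count_eq_zero.mpr hxnot
          have h1 : (rest.takeWhile (fun y => y == x)).count x = (rest.takeWhile (fun y => y == x)).length :=
            List.count_eq_length.mpr (fun y hy => by simp [hrunx y hy])
          have h2 := hrc x
          simp only [List.count_cons_self]
          omega
        have hcv : ∀ v ∈ runKeys (rest.dropWhile (fun y => y == x)), ((x :: rest).count v : Int) = ((rest.dropWhile (fun y => y == x)).count v : Int) := by
          intro v hv
          have hvs' : v ∈ rest.dropWhile (fun y => y == x) := (hmem v).mp hv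
          have hvlt : v < x := hs'lt v hvs'
          have h1 : (rest.takeWhile (fun y => y == x)).count v = 0 :=
            List.count_eq_zero.mpr (fun h => absurd (hrunx v h) (by omega))
          have h2 := hrc v
          have hxv : (x == v) = false := by simp; omega
          simp only [List.count_cons, hxv, if_false, Bool.false_eq_true]
          omega
        rw [glRuns, hkeys, heq]
        rw [List.map_cons]
        congr 1
        · have : ((x :: rest).count x : Int) = 1 + ((rest.takeWhile (fun y => y == x)).length : Int) := by
            rw [hcx]; push_cast; ring
          simp only [pieceFor, this]
        · exact (List.map_congr_left fun v hv => by rw [hcv v hv]).symm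

-- A's loop rewritten as a map over the sorted key list
lemma partsA_eq (p : List Int) :
    gl_decomposition p =
      PySem.Str.join " × "
        ((PySem.List.sorted (PySem.Set.ofList p) (fun x => x) true).map
          (fun v => pieceFor v ((p.count v : Int)))) := by
  show PySem.Str.join " × "
      ((PySem.List.sorted (PySem.Dict.counter p).keys (fun x => x) true).foldl
        (fun parts size =>
          let count := (PySem.Dict.counter p).getD size 0
          if count == 1 then parts ++ ["GL(" ++ PySem.Int.toStr size ++ ")"]
          else parts ++ ["GL(" ++ PySem.Int.toStr size ++ ")^" ++ PySem.Int.toStr count]) []) = _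
  rw [PySem.Dict.keys_counter]
  congr 1
  have : ∀ (l : List Int) (acc : List String),
      l.foldl (fun parts size =>
        let count := (PySem.Dict.counter p).getD size 0
        if count == 1 then parts ++ ["GL(" ++ PySem.Int.toStr size ++ ")"]
        else parts ++ ["GL(" ++ PySem.Int.toStr size ++ ")^" ++ PySem.Int.toStr count]) acc
      = acc ++ l.map (fun v => pieceFor v ((p.count v : Int))) := by
    intro l
    induction l with
    | nil => intro acc; simp
    | cons a l ih =>
      intro acc
      simp only [List.foldl_cons, List.map_cons, ih]
      rw [PySem.Dict.getD_counter]
      by_cases h : ((p.count a : Int) == 1) = true <;> simp [pieceFor, h]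
  simpa using this (PySem.List.sorted (PySem.Set.ofList p) (fun x => x) true) []

-- ===== VERDICT (by name: the statement is the Claim_ definition above) =====
theorem gl_decomposition_spec : Claim_equal_gl_decomposition := by
  intro p _
  unfold Spec_gl_decomposition gl_decomposition_alt
  set s := PySem.List.sorted p (fun x => x) true with hsdef
  have hperm : s.Perm p := PySem.List.sorted_perm p _ true
  have hp : s.Pairwise (fun a b => b ≤ a) := by
    simpa using PySem.List.sorted_pairwise_rev p (fun x => x)
  obtain ⟨hmem, hnd, hpw, heq⟩ := runs_props s.length s le_rfl hp
  have hkeyseq : PySem.List.sorted (PySem.Set.ofList p) (fun x => x) true = runKeys s := by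
    apply PySem.List.sorted_rev_eq_of_perm_of_pairwise_gt
    · rw [List.perm_ext_iff_of_nodup hnd (PySem.Set.nodup_ofList p)]
      intro a
      rw [hmem a, PySem.Set.mem_ofList]
      exact ⟨fun h => hperm.mem_iff.mp h, fun h => hperm.mem_iff.mpr h⟩
    · simpa using hpw
  rw [partsA_eq, hkeyseq, heq]
  congr 1
  apply List.map_congr_left
  intro v _
  rw [hperm.count_eq]
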